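-- pv_equiv track=rewrite | github.com/Alain-Colombia-Arbitrage-Mev/casino | backend/analyze_redis_simple.py | calculate_gaps
-- ===== SOURCE A (Python) =====
-- def calculate_gaps(history):
--     """Calcular gaps entre repeticiones de números"""
--     gaps = {}
--     number_positions = {}
--
--     # Mapear posiciones de cada número
--     for i, num_str in enumerate(history):
--         num = int(num_str)
--         if num not in number_positions:
--             number_positions[num] = []
--         number_positions[num].append(i)
--
--     # Calcular gaps para números que aparecen más de una vez
--     for num, positions in number_positions.items():
--         if len(positions) > 1:
--             gaps[num] = []
--             for i in range(1, len(positions)):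
--                 gap = positions[i-1] - positions[i]  # Distancia entre apariciones
--                 gaps[num].append(gap)
--
--     return gaps
-- ===== SOURCE B (Python) =====
-- def calculate_gaps(history):
--     """Calcular gaps entre repeticiones de números (single pass, no positions lists)."""
--     state = {}  # num -> [last_index, gaps_so_far]; inserted at first appearance
--     for i, num_str in enumerate(history):
--         num = int(num_str)
--         st = state.get(num)
--         if st is None:
--             state[num] = [i, []]
--         else:
--             st[1].append(st[0] - i)
--             st[0] = i
--     return {num: st[1] for num, st in state.items() if st[1]}
-- ===== Notes on version B (the rewrite author's own statement) =====
-- stated objective: alternative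
-- what changed: Replaces A's two-phase algorithm (build a positions list per number, then a second loop computing pairwise gaps from the lists) by a single pass that keeps only each number's last index and accumulates gaps on the fly, plus a final comprehension dropping numbers seen once.
import Mathlib
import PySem

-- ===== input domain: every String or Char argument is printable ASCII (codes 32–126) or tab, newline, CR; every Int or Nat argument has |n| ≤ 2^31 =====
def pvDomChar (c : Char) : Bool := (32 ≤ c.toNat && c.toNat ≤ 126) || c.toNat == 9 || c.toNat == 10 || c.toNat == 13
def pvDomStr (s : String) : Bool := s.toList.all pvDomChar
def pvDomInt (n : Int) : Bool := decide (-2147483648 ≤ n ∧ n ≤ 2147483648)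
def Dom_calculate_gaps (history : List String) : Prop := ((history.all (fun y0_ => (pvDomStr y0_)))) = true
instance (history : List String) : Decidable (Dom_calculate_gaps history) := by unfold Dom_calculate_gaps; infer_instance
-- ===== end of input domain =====

-- B replaces A's two-phase positions-table algorithm by a single pass keeping only the last
-- index and the gaps accumulated so far per number (objective: alternative/simpler state).

-- ===== PORT A =====
def calculate_gaps (history : List String) : List (Int × List Int) :=
  let number_positions : PySem.Dict Int (List Int) :=
    (PySem.List.enumerate history).foldl (fun d p =>
      let num := (PySem.Int.ofStr? p.2).getD 0
      let d := if d.contains num then d else d.insert num []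
      d.modify num [] (fun l => l ++ [p.1])) PySem.Dict.empty
  let gaps : PySem.Dict Int (List Int) :=
    number_positions.items.foldl (fun g q =>
      if 1 < q.2.length then
        let g := g.insert q.1 []
        (PySem.List.pyRange 1 (q.2.length : Int) 1).foldl (fun g i =>
          let gap := (PySem.List.pyGet? q.2 (i - 1)).getD 0 - (PySem.List.pyGet? q.2 i).getD 0
          g.modify q.1 [] (fun l => l ++ [gap])) g
      else g) PySem.Dict.empty
  gaps.items

-- ===== PORT B =====
def calculate_gaps_alt (history : List String) : List (Int × List Int) :=
  let state : PySem.Dict Int (Int × List Int) :=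
    (PySem.List.enumerate history).foldl (fun d p =>
      let num := (PySem.Int.ofStr? p.2).getD 0
      match d.get? num with
      | none => d.insert num (p.1, [])
      | some st => d.insert num (p.1, st.2 ++ [st.1 - p.1])) PySem.Dict.empty
  (state.items.foldl (fun g q =>
      if q.2.2.isEmpty then g else g.insert q.1 q.2.2) PySem.Dict.empty).items

-- ===== PRECONDITION & SPEC =====
-- Pre_: every history entry must parse as a Python int (otherwise A raises ValueError).
def Pre_calculate_gaps (history : List String) : Prop :=
  ∀ s ∈ history, (PySem.Int.ofStr? s).isSome
instance (history : List String) : Decidable (Pre_calculate_gaps history) := by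
  unfold Pre_calculate_gaps; infer_instance

def pvWitness_calculate_gaps : List String := ["3", "7", "3", "3", "7"]

def Spec_calculate_gaps (history : List String) (out : List (Int × List Int)) : Prop := out = calculate_gaps_alt history
instance (history : List String) (out : List (Int × List Int)) : Decidable (Spec_calculate_gaps history out) := by unfold Spec_calculate_gaps; infer_instance

-- ===== CLAIM (what is proved, stated in full; the proofs are below) =====
def Claim_equal_calculate_gaps : Prop := ∀ (history : List String), Dom_calculate_gaps history → Pre_calculate_gaps history → Spec_calculate_gaps history (calculate_gaps history)

-- ===== LEMMAS AND PROOFS =====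
def gapsOf (ps : List Int) : List Int := (ps.zip ps.tail).map (fun q => q.1 - q.2)
def pvF (q : Int × List Int) : Int × (Int × List Int) := (q.1, (q.2.getLastD 0, gapsOf q.2))

theorem gapsOf_append (ps : List Int) (h : ps ≠ []) (x : Int) :
    gapsOf (ps ++ [x]) = gapsOf ps ++ [ps.getLastD 0 - x] := by
  induction ps with
  | nil => simp at h
  | cons a t ih =>
    cases t with
    | nil => simp [gapsOf]
    | cons b r =>
      have := ih (by simp)
      simp [gapsOf] at this ⊢
      exact this

theorem find?_map_keep_fst {ν ν' : Type} (l : List (Int × ν)) (g : Int × ν → ν')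
    (n : Int) :
    List.find? (fun p => p.1 == n) (l.map (fun q => (q.1, g q)))
      = (List.find? (fun p => p.1 == n) l).map (fun q => (q.1, g q)) := by
  induction l with
  | nil => simp
  | cons a t ih =>
    by_cases h : a.1 = n
    · simp [h]
    · simp [h, ih]

theorem get?_mk_map_pvF (l : List (Int × List Int)) (n : Int) :
    (PySem.Dict.mk (l.map pvF)).get? n
      = ((PySem.Dict.mk l).get? n).map (fun ps => (ps.getLastD 0, gapsOf ps)) := by
  have h : l.map pvF = l.map (fun q => (q.1, (fun q : Int × List Int => (q.2.getLastD 0, gapsOf q.2)) q)) := rfl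
  simp only [PySem.Dict.get?, h, find?_map_keep_fst]
  cases List.find? (fun p => p.1 == n) (PySem.Dict.mk l).items <;> rfl

theorem phase1_rel (xs : List (Int × String)) (np : PySem.Dict Int (List Int))
    (hnd : (np.items.map Prod.fst).Nodup) (hne : ∀ q ∈ np.items, q.2 ≠ []) :
    (xs.foldl (fun d p =>
      let num := (PySem.Int.ofStr? p.2).getD 0
      match d.get? num with
      | none => d.insert num (p.1, [])
      | some st => d.insert num (p.1, st.2 ++ [st.1 - p.1])) (PySem.Dict.mk (np.items.map pvF)))
      = PySem.Dict.mk ((xs.foldl (fun d p =>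
          let num := (PySem.Int.ofStr? p.2).getD 0
          let d := if d.contains num then d else d.insert num []
          d.modify num [] (fun l => l ++ [p.1])) np).items.map pvF)
    ∧ ((xs.foldl (fun d p =>
          let num := (PySem.Int.ofStr? p.2).getD 0
          let d := if d.contains num then d else d.insert num []
          d.modify num [] (fun l => l ++ [p.1])) np).items.map Prod.fst).Nodup
    ∧ ∀ q ∈ (xs.foldl (fun d p =>
          let num := (PySem.Int.ofStr? p.2).getD 0
          let d := if d.contains num then d else d.insert num []
          d.modify num [] (fun l => l ++ [p.1])) np).items, q.2 ≠ [] := by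
  induction xs generalizing np with
  | nil => exact ⟨rfl, hnd, hne⟩
  | cons p t ih =>
    simp only [List.foldl_cons]
    set n := (PySem.Int.ofStr? p.2).getD 0 with hn
    have hget := get?_mk_map_pvF np.items n
    have hmk : PySem.Dict.mk np.items = np := rfl
    rw [hmk] at hget
    cases hnp : np.get? n with
    | none =>
      have hcont : np.contains n = false := by
        rw [PySem.Dict.contains_eq_isSome_get?, hnp]; rfl
      -- B step
      have hBget : (PySem.Dict.mk (np.items.map pvF)).get? n = none := by rw [hget, hnp]; rfl
      rw [hBget]
      -- A step
      have hAstep : (if np.contains n then np else np.insert n []).modify n [] (fun l => l ++ [p.1])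
          = np.insert n [p.1] := by
        rw [hcont]
        show (np.insert n []).modify n [] (fun l => l ++ [p.1]) = _
        rw [PySem.Dict.modify, PySem.Dict.getD_insert_self, PySem.Dict.insert_insert_self]
        rfl
      simp only [hcont, Bool.false_eq_true, if_false] at hAstep ⊢
      rw [hAstep]
      have hAitems : (np.insert n [p.1]).items = np.items ++ [(n, [p.1])] :=
        PySem.Dict.items_insert_of_not_contains np _ hcont
      have hBins : (PySem.Dict.mk (np.items.map pvF)).insert n (p.1, [])
          = PySem.Dict.mk ((np.insert n [p.1]).items.map pvF) := by
        have hBcont : (PySem.Dict.mk (np.items.map pvF)).contains n = false := by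
          rw [PySem.Dict.contains_eq_isSome_get?, hBget]; rfl
        have := PySem.Dict.items_insert_of_not_contains (PySem.Dict.mk (np.items.map pvF)) (p.1, ([]:List Int)) hBcont
        apply PySem.Dict.ext
        rw [this, hAitems]
        simp [pvF, gapsOf]
      rw [hBins]
      apply ih
      · rw [hAitems]
        simp only [List.map_append]
        rw [List.nodup_append]
        refine ⟨hnd, by simp, ?_⟩
        intro a ha b hb
        rw [List.map_cons, List.map_nil, List.mem_singleton] at hb
        subst hb
        intro he
        rw [PySem.Dict.get?_eq_none_iff_not_mem_keys] at hnp
        apply hnp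
        simp only [PySem.Dict.keys]
        rw [he] at ha
        simpa using ha
      · intro q hq
        rw [hAitems] at hq
        rcases List.mem_append.mp hq with h1 | h1
        · exact hne q h1
        · simp at h1; subst h1; simp
    | some ps =>
      have hcont : np.contains n = true := by
        rw [PySem.Dict.contains_eq_isSome_get?, hnp]; rfl
      have hpsmem : (n, ps) ∈ np.items := PySem.Dict.mem_items_of_get?_eq_some np hnp
      have hpsne : ps ≠ [] := hne _ hpsmem
      have hBget : (PySem.Dict.mk (np.items.map pvF)).get? n = some (ps.getLastD 0, gapsOf ps) := by
        rw [hget, hnp]; rfl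
      rw [hBget]
      have hAstep : (if np.contains n then np else np.insert n []).modify n [] (fun l => l ++ [p.1])
          = np.insert n (ps ++ [p.1]) := by
        rw [hcont]
        show np.insert n (np.getD n [] ++ [p.1]) = _
        rw [PySem.Dict.getD_of_get?_eq_some np _ hnp]
      simp only [hcont, if_true] at hAstep ⊢
      rw [hAstep]
      have hAitems : (np.insert n (ps ++ [p.1])).items
          = np.items.map (fun q => if q.1 == n then (n, ps ++ [p.1]) else q) :=
        PySem.Dict.items_insert_of_contains np _ hcont
      have hBcont : (PySem.Dict.mk (np.items.map pvF)).contains n = true := by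
        rw [PySem.Dict.contains_eq_isSome_get?, hBget]; rfl
      have hBins : (PySem.Dict.mk (np.items.map pvF)).insert n (p.1, gapsOf ps ++ [ps.getLastD 0 - p.1])
          = PySem.Dict.mk ((np.insert n (ps ++ [p.1])).items.map pvF) := by
        apply PySem.Dict.ext
        rw [PySem.Dict.items_insert_of_contains _ _ hBcont, hAitems]
        show (np.items.map pvF).map _ = (np.items.map _).map pvF
        rw [List.map_map, List.map_map]
        apply List.map_congr_left
        intro q hq
        by_cases hqn : q.1 = n
        · have : q = (n, ps) := List.inj_on_of_nodup_map hnd hq hpsmem hqn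
          subst this
          simp only [Function.comp_apply, pvF, beq_self_eq_true, if_true]
          rw [gapsOf_append ps hpsne p.1]
          simp
        · simp only [Function.comp_apply, pvF]
          rw [if_neg (by simpa using hqn), if_neg (by simpa using hqn)]
      rw [hBins]
      apply ih
      · rw [hAitems]
        rw [List.map_map]
        have : (Prod.fst ∘ fun q : Int × List Int => if q.1 == n then (n, ps ++ [p.1]) else q) = Prod.fst := by
          funext q
          by_cases hqn : q.1 = n
          · simp [Function.comp, hqn]
          · simp [Function.comp, hqn]
        rw [this]
        exact hnd
      · intro q hq
        rw [hAitems] at hq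
        rcases List.mem_map.mp hq with ⟨r, hr, hrq⟩
        by_cases hrn : r.1 = n
        · rw [if_pos (by simpa using hrn)] at hrq
          subst hrq; simp
        · rw [if_neg (by simpa using hrn)] at hrq
          subst hrq; exact hne r hr

theorem gapsList_eq_gapsOf (ps : List Int) :
    (PySem.List.pyRange 1 (ps.length : Int) 1).map (fun i =>
      (PySem.List.pyGet? ps (i - 1)).getD 0 - (PySem.List.pyGet? ps i).getD 0) = gapsOf ps := by
  induction ps using List.reverseRecOn with
  | nil => simp [gapsOf]
  | append_singleton t x ih =>
    rcases eq_or_ne t [] with rfl | hne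
    · simp [gapsOf]
    · have hlen0 : 1 ≤ t.length := List.length_pos_of_ne_nil hne
      have hlen : ((t ++ [x]).length : Int) = (t.length : Int) + 1 := by simp
      have hle : (1 : Int) ≤ (t.length : Int) := by exact_mod_cast hlen0
      rw [hlen, PySem.List.pyRange_one_succ_right hle, List.map_append]
      have hcong : ∀ i ∈ PySem.List.pyRange 1 (t.length : Int) 1,
          (PySem.List.pyGet? (t ++ [x]) (i - 1)).getD 0 - (PySem.List.pyGet? (t ++ [x]) i).getD 0
          = (PySem.List.pyGet? t (i - 1)).getD 0 - (PySem.List.pyGet? t i).getD 0 := by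
        intro i hi
        rw [PySem.List.mem_pyRange_one] at hi
        have e1 : PySem.List.pyGet? (t ++ [x]) (i - 1) = PySem.List.pyGet? t (i - 1) := by
          rw [PySem.List.pyGet?_of_nonneg_of_lt _ (by omega) (by simp only [List.length_append, List.length_cons, List.length_nil]; push_cast; omega),
              PySem.List.pyGet?_of_nonneg_of_lt _ (by omega) (by omega)]
          rw [List.getElem?_append_left (by omega)]
        have e2 : PySem.List.pyGet? (t ++ [x]) i = PySem.List.pyGet? t i := by
          rw [PySem.List.pyGet?_of_nonneg_of_lt _ (by omega) (by simp only [List.length_append, List.length_cons, List.length_nil]; push_cast; omega),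
              PySem.List.pyGet?_of_nonneg_of_lt _ (by omega) (by omega)]
          rw [List.getElem?_append_left (by omega)]
        rw [e1, e2]
      rw [List.map_congr_left hcong, ih, gapsOf_append _ hne x]
      congr 1
      have hx : PySem.List.pyGet? (t ++ [x]) (t.length : Int) = some x :=
        PySem.List.pyGet?_append_length t [] x
      have hlast : PySem.List.pyGet? (t ++ [x]) ((t.length : Int) - 1)
          = some (t.getLastD 0) := by
        have h1 : ((t.length : Int) - 1) = ((t.length - 1 : Nat) : Int) := by omega
        rw [h1, PySem.List.pyGet?_of_nonneg_of_lt _ (by omega) (by simp only [List.length_append, List.length_cons, List.length_nil]; push_cast; omega)]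
        rw [List.getElem?_append_left (by omega)]
        rw [List.getLastD_eq_getLast?, List.getLast?_eq_getElem?]
        have h2 : (t.length - 1 : Nat) < t.length := by omega
        simp [Int.toNat_natCast, h2]
      rw [List.map_singleton, hx, hlast]
      simp

theorem foldl_modify_append_insert {β : Type} (xs : List β) (h : β → Int)
    (g : PySem.Dict Int (List Int)) (k : Int) (v : List Int) :
    xs.foldl (fun g i => g.modify k [] (fun l => l ++ [h i])) (g.insert k v)
      = g.insert k (v ++ xs.map h) := by
  induction xs generalizing v with
  | nil => simp
  | cons a t ih =>
    have h1 : (g.insert k v).modify k [] (fun l => l ++ [h a]) = g.insert k (v ++ [h a]) := by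
      simp [PySem.Dict.modify, PySem.Dict.getD_insert_self, PySem.Dict.insert_insert_self]
    rw [List.foldl_cons, h1, ih]
    simp

theorem phase2A (l : List (Int × List Int)) (g : PySem.Dict Int (List Int))
    (hnd : (l.map Prod.fst).Nodup) (hfresh : ∀ q ∈ l, g.contains q.1 = false) :
    (l.foldl (fun g q =>
      if 1 < q.2.length then
        let g := g.insert q.1 []
        (PySem.List.pyRange 1 (q.2.length : Int) 1).foldl (fun g i =>
          let gap := (PySem.List.pyGet? q.2 (i - 1)).getD 0 - (PySem.List.pyGet? q.2 i).getD 0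
          g.modify q.1 [] (fun l => l ++ [gap])) g
      else g) g).items
    = g.items ++ l.filterMap (fun q =>
        if 1 < q.2.length then
          some (q.1, (PySem.List.pyRange 1 (q.2.length : Int) 1).map (fun i =>
            (PySem.List.pyGet? q.2 (i - 1)).getD 0 - (PySem.List.pyGet? q.2 i).getD 0))
        else none) := by
  induction l generalizing g with
  | nil => simp
  | cons a t ih =>
    rw [List.foldl_cons]
    by_cases hlen : 1 < a.2.length
    · simp only [if_pos hlen]
      rw [foldl_modify_append_insert]
      have hfa : g.contains a.1 = false := hfresh a (by simp)
      have hitems : (g.insert a.1 ([] ++ (PySem.List.pyRange 1 (a.2.length : Int) 1).map (fun i =>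
            (PySem.List.pyGet? a.2 (i - 1)).getD 0 - (PySem.List.pyGet? a.2 i).getD 0))).items
          = g.items ++ [(a.1, (PySem.List.pyRange 1 (a.2.length : Int) 1).map (fun i =>
            (PySem.List.pyGet? a.2 (i - 1)).getD 0 - (PySem.List.pyGet? a.2 i).getD 0))] := by
        rw [PySem.Dict.items_insert_of_not_contains g _ hfa]
        simp
      rw [ih _ (hnd.of_cons) ?_]
      · rw [hitems]
        simp [if_pos hlen]
      · intro q hq
        rw [PySem.Dict.contains_insert]
        have hne : q.1 ≠ a.1 := by
          intro he
          rw [List.map_cons, List.nodup_cons] at hnd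
          exact hnd.1 (he ▸ List.mem_map.mpr ⟨q, hq, rfl⟩)
        simp [hne, hfresh q (by simp [hq])]
    · simp only [if_neg hlen]
      rw [ih _ (hnd.of_cons) (fun q hq => hfresh q (by simp [hq]))]
      simp [if_neg hlen]

theorem phase2B (l : List (Int × (Int × List Int))) (g : PySem.Dict Int (List Int))
    (hnd : (l.map Prod.fst).Nodup) (hfresh : ∀ q ∈ l, g.contains q.1 = false) :
    (l.foldl (fun g q => if q.2.2.isEmpty then g else g.insert q.1 q.2.2) g).items
    = g.items ++ l.filterMap (fun q => if q.2.2.isEmpty then none else some (q.1, q.2.2)) := by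
  induction l generalizing g with
  | nil => simp
  | cons a t ih =>
    rw [List.foldl_cons]
    by_cases he : a.2.2.isEmpty
    · simp only [if_pos he]
      rw [ih _ (hnd.of_cons) (fun q hq => hfresh q (by simp [hq]))]
      simp [List.isEmpty_iff.mp he]
    · simp only [if_neg he, Bool.not_eq_true] at *
      rw [ih _ (hnd.of_cons) ?_]
      · rw [PySem.Dict.items_insert_of_not_contains g _ (hfresh a (by simp))]
        have hne' : a.2.2 ≠ [] := by simpa [List.isEmpty_iff] using he
        rw [List.filterMap_cons]
        simp [he]
      · intro q hq
        rw [PySem.Dict.contains_insert]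
        have hne : q.1 ≠ a.1 := by
          intro h
          rw [List.map_cons, List.nodup_cons] at hnd
          exact hnd.1 (h ▸ List.mem_map.mpr ⟨q, hq, rfl⟩)
        simp [hne, hfresh q (by simp [hq])]

-- ===== VERDICT (by name: the statement is the Claim_ definition above) =====
theorem calculate_gaps_spec : Claim_equal_calculate_gaps := by
  intro history _ _
  unfold Spec_calculate_gaps calculate_gaps calculate_gaps_alt
  have hrel := phase1_rel (PySem.List.enumerate history) PySem.Dict.empty (by simp [PySem.Dict.empty]) (by simp [PySem.Dict.empty])
  have hstart : PySem.Dict.mk (PySem.Dict.empty.items.map pvF) = (PySem.Dict.empty : PySem.Dict Int (Int × List Int)) := rfl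
  rw [hstart] at hrel
  obtain ⟨hB, hnd, hne⟩ := hrel
  simp only [hB]
  set np := (PySem.List.enumerate history).foldl (fun d p =>
      let num := (PySem.Int.ofStr? p.2).getD 0
      let d := if d.contains num then d else d.insert num []
      d.modify num [] (fun l => l ++ [p.1])) PySem.Dict.empty with hnp
  rw [phase2A np.items PySem.Dict.empty hnd (by intro q _; simp)]
  have hndB : (((PySem.Dict.mk (np.items.map pvF)).items).map Prod.fst).Nodup := by
    show ((np.items.map pvF).map Prod.fst).Nodup
    rw [List.map_map]
    exact hnd
  rw [phase2B (PySem.Dict.mk (np.items.map pvF)).items PySem.Dict.empty hndB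
      (by intro q _; simp)]
  show PySem.Dict.empty.items ++ _ = PySem.Dict.empty.items ++ _
  congr 1
  show _ = (np.items.map pvF).filterMap _
  rw [List.filterMap_map]
  apply List.filterMap_congr
  intro q hq
  have hqne : q.2 ≠ [] := hne q hq
  rw [gapsList_eq_gapsOf]
  rcases q with ⟨k, ps⟩
  match ps with
  | [] => exact absurd rfl hqne
  | [a] => simp [pvF, gapsOf]
  | a :: b :: r =>
    simp only [Function.comp_apply, pvF, gapsOf]
    simp
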